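-- pv_equiv track=rewrite | github.com/vitmistina/advent-of-code-2025 | day-05/solution.py | is_fresh
-- ===== SOURCE A (Python) =====
-- def is_fresh(ingredient_id: int, merged_ranges: list[tuple[int, int]]) -> bool:
--     """
--     Determine if an ingredient ID is fresh by checking if it falls within any merged range.
--     Uses binary search for O(log R) lookup where R is the number of merged ranges.
--
--     Args:
--         ingredient_id: The ingredient ID to check
--         merged_ranges: Sorted, disjoint list of (start, end) tuples representing fresh ranges
--
--     Returns:
--         True if the ingredient is fresh (within any range), False otherwise
--     """
--     if not merged_ranges:
--         return False
--
--     # Binary search for the range that might contain ingredient_id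
--     left, right = 0, len(merged_ranges) - 1
--
--     while left <= right:
--         mid = (left + right) // 2
--         start, end = merged_ranges[mid]
--
--         if start <= ingredient_id <= end:
--             return True
--         elif ingredient_id < start:
--             right = mid - 1
--         else:
--             left = mid + 1
--
--     return False
-- ===== SOURCE B (Python) =====
-- def is_fresh(ingredient_id: int, merged_ranges: list[tuple[int, int]]) -> bool:
--     # Simpler: one linear pass instead of the binary search; equal on the
--     # documented domain (sorted, disjoint ranges).
--     return any(start <= ingredient_id <= end for start, end in merged_ranges)
-- ===== Notes on version B (the rewrite author's own statement) =====
-- stated objective: simpler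
-- what changed: Replaced the hand-written binary search over the sorted disjoint range list with a single linear any() pass checking start <= id <= end.
-- outside the precondition, e.g. on is_fresh(5, [(10, 20), (0, 6)]): A returns False, B returns True
import Mathlib
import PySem

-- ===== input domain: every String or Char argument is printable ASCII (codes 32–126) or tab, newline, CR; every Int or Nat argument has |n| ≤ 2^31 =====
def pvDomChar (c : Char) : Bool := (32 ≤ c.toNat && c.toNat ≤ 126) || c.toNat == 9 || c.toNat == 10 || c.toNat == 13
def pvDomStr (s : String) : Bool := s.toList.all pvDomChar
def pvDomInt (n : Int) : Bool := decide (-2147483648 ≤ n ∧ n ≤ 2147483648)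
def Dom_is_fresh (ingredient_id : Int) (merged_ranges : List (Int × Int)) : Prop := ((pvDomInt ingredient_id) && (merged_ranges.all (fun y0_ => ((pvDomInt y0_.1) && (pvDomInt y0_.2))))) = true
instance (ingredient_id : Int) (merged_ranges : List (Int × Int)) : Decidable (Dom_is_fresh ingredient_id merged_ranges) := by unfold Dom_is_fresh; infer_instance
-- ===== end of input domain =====

-- B replaces A's binary search by a single linear any() pass (simpler; equal on the
-- documented domain of sorted, disjoint ranges).

-- ===== PORT A =====
-- the while-loop of A as structural recursion on the shrinking interval [left, right]
def pvBSearch (ingredient_id : Int) (xs : List (Int × Int)) (left right : Int) : Bool :=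
  if h : left ≤ right then
    -- mid = (left + right) // 2 (written inline at each use)
    match PySem.List.pyGet? xs (PySem.Int.floordiv (left + right) 2) with
    | none => false  -- IndexError guard for totality; mid is always in range when called as A calls it
    | some (s, e) =>
      if s ≤ ingredient_id ∧ ingredient_id ≤ e then true
      else if ingredient_id < s then pvBSearch ingredient_id xs left (PySem.Int.floordiv (left + right) 2 - 1)
      else pvBSearch ingredient_id xs (PySem.Int.floordiv (left + right) 2 + 1) right
  else false
termination_by (right + 1 - left).toNat
decreasing_by
  all_goals
    have hb := PySem.Int.floordiv_two_mid_bounds h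
    omega

def is_fresh (ingredient_id : Int) (merged_ranges : List (Int × Int)) : Bool :=
  if merged_ranges = [] then false
  else pvBSearch ingredient_id merged_ranges 0 ((merged_ranges.length : Int) - 1)

-- ===== PORT B =====
def is_fresh_alt (ingredient_id : Int) (merged_ranges : List (Int × Int)) : Bool :=
  merged_ranges.any (fun p => decide (p.1 ≤ ingredient_id) && decide (ingredient_id ≤ p.2))

-- ===== PRECONDITION & SPEC =====
-- Pre_ admits every input whose answer is determined: lists obeying the docstring's
-- sorted-disjoint contract, and any list in which no range contains the id (both searches
-- then necessarily return False); it excludes only contract-violating lists that do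
-- contain the id, where the binary search's answer is an artefact of its probe path and
-- neither value is specified (e.g. A returns False, B True on (5, [(10,20),(0,6)])).
def Pre_is_fresh (ingredient_id : Int) (merged_ranges : List (Int × Int)) : Prop :=
  (∀ p ∈ merged_ranges, ¬(p.1 ≤ ingredient_id ∧ ingredient_id ≤ p.2)) ∨
  (merged_ranges.Pairwise (fun p q => p.2 < q.1) ∧ ∀ p ∈ merged_ranges, p.1 ≤ p.2)
instance (ingredient_id : Int) (merged_ranges : List (Int × Int)) : Decidable (Pre_is_fresh ingredient_id merged_ranges) := by unfold Pre_is_fresh; infer_instance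

def pvWitness_is_fresh : Int × (List (Int × Int)) := (7, [(0, 3), (5, 9), (12, 12)])

def Spec_is_fresh (ingredient_id : Int) (merged_ranges : List (Int × Int)) (out : Bool) : Prop := out = is_fresh_alt ingredient_id merged_ranges
instance (ingredient_id : Int) (merged_ranges : List (Int × Int)) (out : Bool) : Decidable (Spec_is_fresh ingredient_id merged_ranges out) := by unfold Spec_is_fresh; infer_instance

-- ===== CLAIM (what is proved, stated in full; the proofs are below) =====
def Claim_equal_is_fresh : Prop := ∀ (ingredient_id : Int) (merged_ranges : List (Int × Int)), Dom_is_fresh ingredient_id merged_ranges → Pre_is_fresh ingredient_id merged_ranges → Spec_is_fresh ingredient_id merged_ranges (is_fresh ingredient_id merged_ranges)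

-- ===== LEMMAS AND PROOFS =====

-- On a sorted disjoint list, the binary search over [left, right] finds a containing
-- range iff one exists at an index in [left, right].
lemma pvBSearch_true_iff (ingredient_id : Int) (xs : List (Int × Int))
    (hp : xs.Pairwise (fun p q => p.2 < q.1)) (hv : ∀ p ∈ xs, p.1 ≤ p.2) :
    ∀ n (left right : Int), (right + 1 - left).toNat = n → 0 ≤ left → right < (xs.length : Int) →
      (pvBSearch ingredient_id xs left right = true ↔
        ∃ i : Nat, ∃ h : i < xs.length, left ≤ (i : Int) ∧ (i : Int) ≤ right ∧
          xs[i].1 ≤ ingredient_id ∧ ingredient_id ≤ xs[i].2) := by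
  have hpg := List.pairwise_iff_getElem.mp hp
  intro n
  induction n using Nat.strong_induction_on with
  | _ n ih =>
    intro left right hn hl hr
    rw [pvBSearch]
    by_cases hlr : left ≤ right
    · have hb := PySem.Int.floordiv_two_mid_bounds hlr
      set mid := PySem.Int.floordiv (left + right) 2 with hmid
      have h0 : 0 ≤ mid := le_trans hl hb.1
      have hml : mid < (xs.length : Int) := lt_of_le_of_lt hb.2 hr
      have hmn : mid.toNat < xs.length := by omega
      have hget : PySem.List.pyGet? xs mid = some xs[mid.toNat] :=
        PySem.List.pyGet?_eq_some_getElem xs h0 hml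
      rcases hse : xs[mid.toNat] with ⟨s, e⟩
      rw [dif_pos hlr, hget, hse]
      by_cases hin : s ≤ ingredient_id ∧ ingredient_id ≤ e
      · simp only [if_pos hin, true_iff]
        exact ⟨mid.toNat, hmn, by omega, by omega, by rw [hse]; exact hin.1, by rw [hse]; exact hin.2⟩
      · simp only [if_neg hin]
        by_cases hlt : ingredient_id < s
        · simp only [if_pos hlt]
          rw [ih ((mid - 1) + 1 - left).toNat (by omega) left (mid - 1) rfl hl (by omega)]
          constructor
          · rintro ⟨i, hi, h1, h2, h3, h4⟩
            exact ⟨i, hi, h1, by omega, h3, h4⟩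
          · rintro ⟨i, hi, h1, h2, h3, h4⟩
            refine ⟨i, hi, h1, ?_, h3, h4⟩
            by_contra hc
            -- i ≥ mid; show xs[i] cannot contain ingredient_id
            rcases eq_or_lt_of_le (show mid.toNat ≤ i by omega) with heq | hgt
            · subst heq; rw [hse] at h3; omega
            · have := hpg mid.toNat i hmn hi hgt
              have hse2 : s ≤ e := by
                have := hv xs[mid.toNat] (List.getElem_mem hmn)
                rw [hse] at this; exact this
              rw [hse] at this
              omega
        · simp only [if_neg hlt]
          rw [ih (right + 1 - (mid + 1)).toNat (by omega) (mid + 1) right rfl (by omega) hr]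
          constructor
          · rintro ⟨i, hi, h1, h2, h3, h4⟩
            exact ⟨i, hi, by omega, h2, h3, h4⟩
          · rintro ⟨i, hi, h1, h2, h3, h4⟩
            refine ⟨i, hi, ?_, h2, h3, h4⟩
            by_contra hc
            -- i ≤ mid; show xs[i] cannot contain ingredient_id
            rcases eq_or_lt_of_le (show i ≤ mid.toNat by omega) with heq | hgt
            · subst heq; rw [hse] at h4; omega
            · have := hpg i mid.toNat hi hmn hgt
              have hse2 : s ≤ e := by
                have := hv xs[mid.toNat] (List.getElem_mem hmn)
                rw [hse] at this; exact this
              rw [hse] at this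
              omega
    · simp only [dif_neg hlr, Bool.false_eq_true, false_iff]
      rintro ⟨i, hi, h1, h2, _, _⟩
      omega

lemma is_fresh_alt_true_iff (ingredient_id : Int) (xs : List (Int × Int)) :
    is_fresh_alt ingredient_id xs = true ↔
      ∃ i : Nat, ∃ h : i < xs.length, xs[i].1 ≤ ingredient_id ∧ ingredient_id ≤ xs[i].2 := by
  unfold is_fresh_alt
  rw [List.any_eq_true]
  constructor
  · rintro ⟨p, hp, hf⟩
    obtain ⟨i, hi, rfl⟩ := List.mem_iff_getElem.mp hp
    simp only [Bool.and_eq_true, decide_eq_true_eq] at hf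
    exact ⟨i, hi, hf.1, hf.2⟩
  · rintro ⟨i, hi, h1, h2⟩
    exact ⟨xs[i], List.getElem_mem hi, by simp [h1, h2]⟩

-- When no range contains the id, the binary search returns False no matter the interval.
lemma pvBSearch_false (ingredient_id : Int) (xs : List (Int × Int))
    (hno : ∀ p ∈ xs, ¬(p.1 ≤ ingredient_id ∧ ingredient_id ≤ p.2)) :
    ∀ n (left right : Int), (right + 1 - left).toNat = n →
      pvBSearch ingredient_id xs left right = false := by
  intro n
  induction n using Nat.strong_induction_on with
  | _ n ih =>
    intro left right hn
    rw [pvBSearch]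
    by_cases hlr : left ≤ right
    · have hb := PySem.Int.floordiv_two_mid_bounds hlr
      rw [dif_pos hlr]
      rcases hg : PySem.List.pyGet? xs (PySem.Int.floordiv (left + right) 2) with _ | ⟨s, e⟩
      · rfl
      · have hmem := PySem.List.mem_of_pyGet?_eq_some xs hg
        have hns := hno (s, e) hmem
        dsimp only
        rw [if_neg hns]
        by_cases hlt : ingredient_id < s
        · rw [if_pos hlt]
          exact ih _ (by omega) _ _ rfl
        · rw [if_neg hlt]
          exact ih _ (by omega) _ _ rfl
    · rw [dif_neg hlr]

-- ===== VERDICT (by name: the statement is the Claim_ definition above) =====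
theorem is_fresh_spec : Claim_equal_is_fresh := by
  intro ingredient_id merged_ranges _ hpre
  unfold Spec_is_fresh
  rcases hpre with hno | hpre
  · -- no range contains the id: both sides are False
    have halt : is_fresh_alt ingredient_id merged_ranges = false := by
      unfold is_fresh_alt
      rw [List.any_eq_false]
      intro p hp
      simpa using hno p hp
    unfold is_fresh
    by_cases hnil : merged_ranges = []
    · rw [if_pos hnil, halt]
    · rw [if_neg hnil, halt]
      exact pvBSearch_false ingredient_id merged_ranges hno _ _ _ rfl
  rw [Bool.eq_iff_iff]
  unfold is_fresh
  by_cases hnil : merged_ranges = []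
  · subst hnil
    simp [is_fresh_alt]
  · simp only [if_neg hnil]
    have hlen : 0 < merged_ranges.length := List.length_pos_iff.mpr hnil
    rw [pvBSearch_true_iff ingredient_id merged_ranges hpre.1 hpre.2
        (((merged_ranges.length : Int) - 1) + 1 - 0).toNat 0 ((merged_ranges.length : Int) - 1)
        rfl (by omega) (by omega),
      is_fresh_alt_true_iff]
    constructor
    · rintro ⟨i, hi, _, _, h3, h4⟩; exact ⟨i, hi, h3, h4⟩
    · rintro ⟨i, hi, h3, h4⟩; exact ⟨i, hi, by omega, by omega, h3, h4⟩
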